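-- pv_equiv track=rewrite | github.com/Banhcanhcua1107/recruitment-platform | ai-service/services/cv_parser.py | _rebuild_corrected_text
-- ===== SOURCE A (Python) =====
-- def _rebuild_corrected_text(blocks: list[str]) -> str:
--     output: list[str] = []
--     previous_blank = False
--     for block in blocks:
--         if block == "":
--             if not previous_blank:
--                 output.append("")
--             previous_blank = True
--             continue
--         output.append(block)
--         previous_blank = False
--     return "\n".join(output).strip()
-- ===== SOURCE B (Python) =====
-- def _rebuild_corrected_text(blocks: list[str]) -> str:
--     # Pass 1: group blocks into maximal runs keyed by "is blank".
--     runs: list[tuple[bool, list[str]]] = []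
--     for b in blocks:
--         key = (b == "")
--         if runs and runs[-1][0] == key:
--             runs[-1][1].append(b)
--         else:
--             runs.append((key, [b]))
--     # Pass 2: each blank run collapses to a single "", non-blank runs pass through.
--     output: list[str] = []
--     for key, group in runs:
--         if key:
--             output.append("")
--         else:
--             output.extend(group)
--     return "\n".join(output).strip()
-- ===== Notes on version B (the rewrite author's own statement) =====
-- stated objective: alternative
-- what changed: Replaces the streaming previous_blank state machine by a two-pass group-then-emit algorithm: first build maximal runs of blank/non-blank blocks, then emit a single empty string per blank run and the blocks of each non-blank run.
import Mathlib
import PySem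

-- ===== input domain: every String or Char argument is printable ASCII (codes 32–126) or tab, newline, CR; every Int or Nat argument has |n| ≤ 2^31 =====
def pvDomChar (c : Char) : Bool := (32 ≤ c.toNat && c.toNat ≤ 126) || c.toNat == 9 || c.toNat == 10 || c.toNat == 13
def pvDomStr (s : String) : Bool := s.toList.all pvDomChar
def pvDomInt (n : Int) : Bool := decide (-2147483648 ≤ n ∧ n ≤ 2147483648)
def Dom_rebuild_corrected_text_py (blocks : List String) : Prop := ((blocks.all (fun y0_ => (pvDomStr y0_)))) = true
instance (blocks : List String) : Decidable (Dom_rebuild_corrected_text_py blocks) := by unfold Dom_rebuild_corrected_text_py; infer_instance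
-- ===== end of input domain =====

-- B collapses consecutive blank blocks by grouping into runs first (two passes) instead of A's
-- streaming previous_blank flag; same return value, no speed claim.

-- ===== PORT A =====
def rebuild_corrected_text_py (blocks : List String) : String :=
  let st := blocks.foldl
    (fun (s : List String × Bool) block =>
      if block == "" then
        (if !s.2 then s.1 ++ [""] else s.1, true)
      else
        (s.1 ++ [block], false))
    ([], false)
  PySem.Str.strip (PySem.Str.join "\n" st.1)

-- ===== PORT B =====
-- Source B's `runs[-1][0] == key` merge-or-start-a-new-run step, appending at the end of `runs`.
def pvAddBlock : List (Bool × List String) → String → List (Bool × List String)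
  | [], b => [((b == ""), [b])]
  | [(k, g)], b => if (b == "") == k then [(k, g ++ [b])] else [(k, g), ((b == ""), [b])]
  | r :: rs, b => r :: pvAddBlock rs b

def rebuild_corrected_text_py_alt (blocks : List String) : String :=
  let runs := blocks.foldl pvAddBlock []
  let output := runs.foldl
    (fun (out : List String) (p : Bool × List String) =>
      if p.1 then out ++ [""] else out ++ p.2) []
  PySem.Str.strip (PySem.Str.join "\n" output)

-- ===== PRECONDITION & SPEC =====
def Spec_rebuild_corrected_text_py (blocks : List String) (out : String) : Prop := out = rebuild_corrected_text_py_alt blocks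
instance (blocks : List String) (out : String) : Decidable (Spec_rebuild_corrected_text_py blocks out) := by unfold Spec_rebuild_corrected_text_py; infer_instance

-- ===== CLAIM (what is proved, stated in full; the proofs are below) =====
def Claim_equal_rebuild_corrected_text_py : Prop := ∀ (blocks : List String), Dom_rebuild_corrected_text_py blocks → Spec_rebuild_corrected_text_py blocks (rebuild_corrected_text_py blocks)

-- ===== LEMMAS AND PROOFS =====

-- what a run list emits
def pvFlat (rs : List (Bool × List String)) : List String :=
  rs.flatMap (fun p => if p.1 then [""] else p.2)

-- whether the last run (if any) is a blank run
def pvLastBlank (rs : List (Bool × List String)) : Bool :=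
  match rs.getLast? with
  | some (k, _) => k
  | none => false

theorem pvLastBlank_addBlock (rs : List (Bool × List String)) (b : String) :
    pvLastBlank (pvAddBlock rs b) = (b == "") := by
  induction rs with
  | nil => simp [pvAddBlock, pvLastBlank]
  | cons r rs ih =>
    match rs, r with
    | [], (k, g) =>
      by_cases h : (b == "") = k
      · simp [pvAddBlock, pvLastBlank, h]
      · simp [pvAddBlock, pvLastBlank, h]
    | r' :: rs', r =>
      have : pvLastBlank (r :: pvAddBlock (r' :: rs') b) = pvLastBlank (pvAddBlock (r' :: rs') b) := by
        obtain ⟨y, ys, hy⟩ : ∃ y ys, pvAddBlock (r' :: rs') b = y :: ys := by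
          match rs', r' with
          | [], (k, g) => by_cases h : (b == "") = k <;> simp [pvAddBlock, h]
          | x :: xs, r' => simp [pvAddBlock]
        simp [pvLastBlank, hy, List.getLast?_cons_cons]
      rw [show pvAddBlock (r :: r' :: rs') b = r :: pvAddBlock (r' :: rs') b from rfl, this, ih]

theorem pvFlat_addBlock (rs : List (Bool × List String)) (b : String) :
    pvFlat (pvAddBlock rs b) =
      if b == "" then
        (if pvLastBlank rs then pvFlat rs else pvFlat rs ++ [""])
      else pvFlat rs ++ [b] := by
  induction rs with
  | nil => by_cases h : b = "" <;> simp [pvAddBlock, pvFlat, pvLastBlank, h]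
  | cons r rs ih =>
    match rs, r with
    | [], (k, g) =>
      by_cases hb : b = "" <;> by_cases hk : k = true <;>
        simp [pvAddBlock, pvFlat, pvLastBlank, hb, hk]
    | r' :: rs', r =>
      have h1 : pvAddBlock (r :: r' :: rs') b = r :: pvAddBlock (r' :: rs') b := rfl
      have h2 : pvLastBlank (r :: r' :: rs') = pvLastBlank (r' :: rs') := by
        simp [pvLastBlank, List.getLast?_cons_cons]
      rw [h1, h2]
      by_cases hb : b = ""
      · by_cases hl : pvLastBlank (r' :: rs') = true <;>
          simp [pvFlat, hb, hl] at ih ⊢ <;> simp [ih]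
      · simp [pvFlat, hb] at ih ⊢; simp [ih]

-- the two loops stay related: A's (output, previous_blank) ↔ B's run list
theorem pvLoop (bs : List String) :
    ∀ (s : List String × Bool) (rs : List (Bool × List String)),
      s.1 = pvFlat rs → s.2 = pvLastBlank rs →
      (bs.foldl
        (fun (s : List String × Bool) block =>
          if block == "" then
            (if !s.2 then s.1 ++ [""] else s.1, true)
          else
            (s.1 ++ [block], false)) s).1
        = pvFlat (bs.foldl pvAddBlock rs) := by
  induction bs with
  | nil => intro s rs h1 h2; simpa using h1
  | cons b bs ih =>
    intro s rs h1 h2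
    simp only [List.foldl_cons]
    by_cases hb : b = ""
    · by_cases hp : s.2 = true
      · apply ih
        · simp [hb, hp, h1, pvFlat_addBlock, ← h2]
        · simp [hb, pvLastBlank_addBlock]
      · apply ih
        · simp [hb, hp, h1, pvFlat_addBlock, ← h2]
        · simp [hb, pvLastBlank_addBlock]
    · apply ih
      · simp [hb, h1, pvFlat_addBlock]
      · simp [hb, pvLastBlank_addBlock]

theorem pvEmit (rs : List (Bool × List String)) :
    ∀ acc : List String,
      rs.foldl (fun (out : List String) (p : Bool × List String) =>
        if p.1 then out ++ [""] else out ++ p.2) acc = acc ++ pvFlat rs := by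
  induction rs with
  | nil => intro acc; simp [pvFlat]
  | cons p rs ih =>
    intro acc
    by_cases h : p.1 = true <;> simp [pvFlat, h, ih]

-- ===== VERDICT (by name: the statement is the Claim_ definition above) =====
theorem rebuild_corrected_text_py_spec : Claim_equal_rebuild_corrected_text_py := by
  intro blocks _
  unfold Spec_rebuild_corrected_text_py rebuild_corrected_text_py rebuild_corrected_text_py_alt
  have h := pvLoop blocks ([], false) [] (by simp [pvFlat]) (by simp [pvLastBlank])
  have h2 := pvEmit (List.foldl pvAddBlock [] blocks) []
  simp only [List.nil_append] at h2
  exact congrArg (fun l => PySem.Str.strip (PySem.Str.join "\n" l)) (h.trans h2.symm)
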